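-- pv_equiv track=rewrite | github.com/harshagarine/NutriGenie | second_agent.py | extract_unique_ingredients
-- ===== SOURCE A (Python) =====
-- from typing import Dict, List, Any, Optional
--
-- def extract_unique_ingredients(meal_plan: Dict[str, Any]) -> List[str]:
--     """
--     Extract unique ingredients from a meal plan.
--     Returns a deduplicated list of ingredient names.
--     """
--     ingredients_set = set()
--
--     meals = meal_plan.get('meals', [])
--     for meal in meals:
--         ingredients = meal.get('ingredients', [])
--         for ingredient in ingredients:
--             # Normalize ingredient name (lowercase, strip whitespace)
--             normalized = ingredient.lower().strip()
--             ingredients_set.add(normalized)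
--
--     return sorted(list(ingredients_set))
-- ===== SOURCE B (Python) =====
-- def _insert_unique(sorted_list, name):
--     """Ordered insert into a sorted, duplicate-free list; drop name if present."""
--     if not sorted_list or name < sorted_list[0]:
--         return [name] + sorted_list
--     if name == sorted_list[0]:
--         return sorted_list
--     return [sorted_list[0]] + _insert_unique(sorted_list[1:], name)
--
-- def extract_unique_ingredients(meal_plan):
--     """
--     Extract unique ingredients from a meal plan.
--     Keeps the result sorted and duplicate-free at all times by ordered
--     insertion (insertion-sort style); no set and no final sort.
--     """
--     result = []
--     for name in (ingredient.lower().strip()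
--                  for meal in meal_plan.get('meals', [])
--                  for ingredient in meal.get('ingredients', [])):
--         result = _insert_unique(result, name)
--     return result
-- ===== Notes on version B (the rewrite author's own statement) =====
-- stated objective: alternative
-- what changed: Replaces hash-set accumulation followed by a final sort with incremental ordered insertion: each normalized name is inserted into an always-sorted duplicate-free list (insertion-sort style), so no set is maintained and no final sort is run.
import Mathlib
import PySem

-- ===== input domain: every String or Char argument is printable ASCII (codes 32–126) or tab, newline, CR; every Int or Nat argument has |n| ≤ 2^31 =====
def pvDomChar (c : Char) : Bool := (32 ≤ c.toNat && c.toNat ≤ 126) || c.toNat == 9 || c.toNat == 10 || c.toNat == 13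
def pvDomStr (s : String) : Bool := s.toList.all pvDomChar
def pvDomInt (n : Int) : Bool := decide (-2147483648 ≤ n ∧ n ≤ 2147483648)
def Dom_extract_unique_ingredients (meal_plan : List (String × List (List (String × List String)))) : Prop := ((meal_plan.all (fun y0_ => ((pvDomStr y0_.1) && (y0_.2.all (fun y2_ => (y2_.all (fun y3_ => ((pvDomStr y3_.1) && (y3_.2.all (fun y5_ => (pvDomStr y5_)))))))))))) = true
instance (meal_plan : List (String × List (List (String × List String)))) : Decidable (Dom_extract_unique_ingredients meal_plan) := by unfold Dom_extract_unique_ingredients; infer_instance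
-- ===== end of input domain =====

-- B keeps the result sorted and duplicate-free at all times by ordered insertion of each
-- normalized name (insertion-sort style), instead of A's hash-set accumulation + final sort.

-- ===== PORT A =====
def extract_unique_ingredients (meal_plan : List (String × List (List (String × List String)))) : List String :=
  let meals := PySem.Dict.getD ⟨meal_plan⟩ "meals" []
  let ingredients_set : PySem.Set String :=
    meals.foldl (fun acc meal =>
      (PySem.Dict.getD ⟨meal⟩ "ingredients" []).foldl
        (fun acc2 ingredient => PySem.Set.add acc2 (PySem.Str.strip (PySem.Str.lower ingredient)))
        acc)
      PySem.Set.empty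
  PySem.List.sorted ingredients_set (fun x => x) false

-- ===== PORT B =====
-- _insert_unique: ordered insert into a sorted duplicate-free list, dropping duplicates
def insertUnique : List String → String → List String
  | [], name => [name]
  | x :: xs, name =>
    if name < x then name :: x :: xs
    else if name = x then x :: xs
    else x :: insertUnique xs name

def extract_unique_ingredients_alt (meal_plan : List (String × List (List (String × List String)))) : List String :=
  ((PySem.Dict.getD ⟨meal_plan⟩ "meals" []).flatMap (fun meal =>
      (PySem.Dict.getD ⟨meal⟩ "ingredients" []).map
        (fun ingredient => PySem.Str.strip (PySem.Str.lower ingredient)))).foldl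
    insertUnique []

-- ===== PRECONDITION & SPEC =====
def Spec_extract_unique_ingredients (meal_plan : List (String × List (List (String × List String)))) (out : List String) : Prop := out = extract_unique_ingredients_alt meal_plan
instance (meal_plan : List (String × List (List (String × List String)))) (out : List String) : Decidable (Spec_extract_unique_ingredients meal_plan out) := by unfold Spec_extract_unique_ingredients; infer_instance

-- ===== CLAIM (what is proved, stated in full; the proofs are below) =====
def Claim_equal_extract_unique_ingredients : Prop := ∀ (meal_plan : List (String × List (List (String × List String)))), Dom_extract_unique_ingredients meal_plan → Spec_extract_unique_ingredients meal_plan (extract_unique_ingredients meal_plan)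

-- ===== LEMMAS AND PROOFS =====

lemma mem_insertUnique (l : List String) (x a : String) :
    a ∈ insertUnique l x ↔ a ∈ l ∨ a = x := by
  induction l with
  | nil => simp [insertUnique]
  | cons y ys ih =>
    by_cases h1 : x < y
    · simp [insertUnique, h1]; tauto
    · by_cases h2 : x = y
      · subst h2; simp [insertUnique]; tauto
      · simp [insertUnique, h1, h2, ih]; tauto

lemma pairwise_insertUnique (l : List String) (x : String) (h : l.Pairwise (· < ·)) :
    (insertUnique l x).Pairwise (· < ·) := by
  induction l with
  | nil => simp [insertUnique]
  | cons y ys ih =>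
    obtain ⟨hy, hys⟩ := List.pairwise_cons.mp h
    by_cases h1 : x < y
    · simp only [insertUnique, if_pos h1]
      exact List.pairwise_cons.mpr ⟨by
        intro a ha
        rcases List.mem_cons.mp ha with rfl | ha
        · exact h1
        · exact lt_trans h1 (hy a ha), h⟩
    · by_cases h2 : x = y
      · subst h2
        have he : insertUnique (x :: ys) x = x :: ys := by simp [insertUnique]
        rw [he]; exact h
      · have hyx : y < x := lt_of_le_of_ne (le_of_not_gt h1) (Ne.symm h2)
        simp only [insertUnique, if_neg h1, if_neg h2]
        refine List.pairwise_cons.mpr ⟨?_, ih hys⟩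
        intro a ha
        rcases (mem_insertUnique ys x a).mp ha with ha | rfl
        · exact hy a ha
        · exact hyx

lemma foldl_insertUnique_spec (F : List String) : ∀ acc : List String,
    acc.Pairwise (· < ·) →
    (F.foldl insertUnique acc).Pairwise (· < ·)
      ∧ ∀ a, a ∈ F.foldl insertUnique acc ↔ a ∈ acc ∨ a ∈ F := by
  induction F with
  | nil => intro acc h; simpa using h
  | cons x xs ih =>
    intro acc h
    rw [List.foldl_cons]
    obtain ⟨h1, h2⟩ := ih (insertUnique acc x) (pairwise_insertUnique acc x h)
    refine ⟨h1, fun a => ?_⟩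
    rw [h2 a, mem_insertUnique]
    simp; tauto

-- sorted(set(F)) equals the incremental ordered-insertion fold over F
lemma sorted_set_eq_foldl (F : List String) :
    PySem.List.sorted (PySem.Set.ofList F) (fun x => x) false = F.foldl insertUnique [] := by
  obtain ⟨hp, hm⟩ := foldl_insertUnique_spec F [] (by simp)
  refine PySem.List.sorted_eq_of_perm_of_pairwise_lt _ _ (fun x => x) ?_ hp
  refine (List.perm_ext_iff_of_nodup (hp.imp fun h => ne_of_lt h) (PySem.Set.nodup_ofList F)).mpr ?_
  intro a
  rw [hm a, PySem.Set.mem_ofList]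
  simp

-- A's nested set-insertion loop builds set(F) for the flattened normalized list F
lemma a_fold_eq (meals : List (List (String × List String))) :
    ∀ acc : PySem.Set String,
    meals.foldl (fun acc meal =>
      (PySem.Dict.getD ⟨meal⟩ "ingredients" []).foldl
        (fun acc2 ingredient => PySem.Set.add acc2 (PySem.Str.strip (PySem.Str.lower ingredient)))
        acc) acc
    = PySem.Set.update acc (meals.flatMap (fun meal =>
        (PySem.Dict.getD ⟨meal⟩ "ingredients" []).map
          (fun ingredient => PySem.Str.strip (PySem.Str.lower ingredient)))) := by
  induction meals with
  | nil => intro acc; simp [PySem.Set.update]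
  | cons m ms ih =>
    intro acc
    rw [List.foldl_cons, List.flatMap_cons, ih, ← PySem.Set.update_map_eq_foldl_add,
      PySem.Set.update_append]

-- ===== VERDICT (by name: the statement is the Claim_ definition above) =====
theorem extract_unique_ingredients_spec : Claim_equal_extract_unique_ingredients := by
  intro mp _
  unfold Spec_extract_unique_ingredients
  simp only [extract_unique_ingredients, extract_unique_ingredients_alt]
  rw [a_fold_eq, PySem.Set.update_empty, sorted_set_eq_foldl]
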